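-- pv_equiv track=rewrite | github.com/TaoishTechy/RGPUF | examples/rgpuf_lab.py | bresenham_los
-- ===== SOURCE A (Python) =====
-- def bresenham_los(x0: int, y0: int, x1: int, y1: int) -> list[tuple[int, int]]:
--     """Bresenham line-of-sight — Colony / 3-Demon family."""
--     cells: list[tuple[int, int]] = []
--     dx = abs(x1 - x0)
--     dy = -abs(y1 - y0)
--     sx = 1 if x0 < x1 else -1
--     sy = 1 if y0 < y1 else -1
--     err = dx + dy
--     cx, cy = x0, y0
--     while True:
--         cells.append((cx, cy))
--         if cx == x1 and cy == y1:
--             break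
--         e2 = 2 * err
--         if e2 >= dy:
--             err += dy
--             cx += sx
--         if e2 <= dx:
--             err += dx
--             cy += sy
--     return cells
-- ===== SOURCE B (Python) =====
-- def bresenham_los(x0: int, y0: int, x1: int, y1: int) -> list[tuple[int, int]]:
--     """Major-axis (driving-axis) Bresenham: one driving loop per octant class,
--     with the classic doubled error term initialized to 2*minor - major."""
--     dx = abs(x1 - x0)
--     dy = abs(y1 - y0)
--     sx = 1 if x0 < x1 else -1
--     sy = 1 if y0 < y1 else -1
--     cells: list[tuple[int, int]] = []
--     cx, cy = x0, y0
--     if dx >= dy: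
--         u = 2 * dy - dx
--         while True:
--             cells.append((cx, cy))
--             if cx == x1 and cy == y1:
--                 break
--             if u >= 0:
--                 cy += sy
--                 u -= 2 * dx
--             u += 2 * dy
--             cx += sx
--     else:
--         v = 2 * dx - dy
--         while True:
--             cells.append((cx, cy))
--             if cx == x1 and cy == y1:
--                 break
--             if v >= 0:
--                 cx += sx
--                 v -= 2 * dy
--             v += 2 * dx
--             cy += sy
--     return cells
-- ===== Notes on version B (the rewrite author's own statement) =====
-- stated objective: alternative
-- what changed: Replaces A's single combined-error loop (two conditionals, either of which may fire each iteration) with the classic major-axis decomposition: two separate driving loops (x-driving when dx>=dy, y-driving otherwise), each with a single doubled error term initialized to 2*minor - major and one conditional minor-axis step per iteration.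
import Mathlib
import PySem

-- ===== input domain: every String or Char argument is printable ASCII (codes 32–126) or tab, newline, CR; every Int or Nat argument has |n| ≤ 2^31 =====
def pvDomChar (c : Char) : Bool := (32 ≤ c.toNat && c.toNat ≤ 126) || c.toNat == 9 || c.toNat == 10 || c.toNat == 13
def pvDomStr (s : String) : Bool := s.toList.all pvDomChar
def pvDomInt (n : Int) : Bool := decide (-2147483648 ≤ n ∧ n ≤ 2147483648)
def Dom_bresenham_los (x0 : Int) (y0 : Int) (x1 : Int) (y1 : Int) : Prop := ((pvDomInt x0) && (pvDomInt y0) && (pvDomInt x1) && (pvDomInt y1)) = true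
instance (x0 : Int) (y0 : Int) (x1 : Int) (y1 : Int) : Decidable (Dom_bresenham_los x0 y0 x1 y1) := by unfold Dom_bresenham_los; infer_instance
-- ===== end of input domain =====

-- B replaces A's single combined-error loop (two conditional steps per iteration) by the
-- classic major-axis decomposition: one x-driving and one y-driving loop, each with a single
-- doubled error term initialized to 2*minor - major; same cells, same order (objective: alternative).

-- ===== PORT A =====
-- A's `while True` loop; fuel (dx - dy).toNat + 1 bounds the number of iterations
-- (each iteration before the break moves one or both coordinates one step toward the target),
-- so the fuel-0 branch is never the one that returns on a run that A finishes.
def bresenhamLoopA (x1 y1 sx sy dx dy : Int) : Nat → Int → Int → Int → List (Int × Int)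
  | 0, _, _, _ => []
  | n + 1, cx, cy, err =>
    (cx, cy) ::
      (if cx = x1 ∧ cy = y1 then []
       else
         let e2 := 2 * err
         let err1 := if e2 ≥ dy then err + dy else err
         let cx1 := if e2 ≥ dy then cx + sx else cx
         let err2 := if e2 ≤ dx then err1 + dx else err1
         let cy1 := if e2 ≤ dx then cy + sy else cy
         bresenhamLoopA x1 y1 sx sy dx dy n cx1 cy1 err2)

def bresenham_los (x0 : Int) (y0 : Int) (x1 : Int) (y1 : Int) : List (Int × Int) :=
  let dx := |x1 - x0|
  let dy := -|y1 - y0|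
  let sx : Int := if x0 < x1 then 1 else -1
  let sy : Int := if y0 < y1 then 1 else -1
  bresenhamLoopA x1 y1 sx sy dx dy ((dx - dy).toNat + 1) x0 y0 (dx + dy)

-- ===== PORT B =====
-- x-driving loop of B (dx ≥ dy octants); dy here is abs(y1-y0) ≥ 0.
def bresenhamLoopX (x1 y1 sx sy dx dy : Int) : Nat → Int → Int → Int → List (Int × Int)
  | 0, _, _, _ => []
  | n + 1, cx, cy, u =>
    (cx, cy) ::
      (if cx = x1 ∧ cy = y1 then []
       else if u ≥ 0 then
         bresenhamLoopX x1 y1 sx sy dx dy n (cx + sx) (cy + sy) (u - 2 * dx + 2 * dy)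
       else
         bresenhamLoopX x1 y1 sx sy dx dy n (cx + sx) cy (u + 2 * dy))

-- y-driving loop of B (dy > dx octants).
def bresenhamLoopY (x1 y1 sx sy dx dy : Int) : Nat → Int → Int → Int → List (Int × Int)
  | 0, _, _, _ => []
  | n + 1, cx, cy, v =>
    (cx, cy) ::
      (if cx = x1 ∧ cy = y1 then []
       else if v ≥ 0 then
         bresenhamLoopY x1 y1 sx sy dx dy n (cx + sx) (cy + sy) (v - 2 * dy + 2 * dx)
       else
         bresenhamLoopY x1 y1 sx sy dx dy n cx (cy + sy) (v + 2 * dx))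

def bresenham_los_alt (x0 : Int) (y0 : Int) (x1 : Int) (y1 : Int) : List (Int × Int) :=
  let dx := |x1 - x0|
  let dy := |y1 - y0|
  let sx : Int := if x0 < x1 then 1 else -1
  let sy : Int := if y0 < y1 then 1 else -1
  if dx ≥ dy then
    bresenhamLoopX x1 y1 sx sy dx dy ((dx + dy).toNat + 1) x0 y0 (2 * dy - dx)
  else
    bresenhamLoopY x1 y1 sx sy dx dy ((dx + dy).toNat + 1) x0 y0 (2 * dx - dy)

-- ===== PRECONDITION & SPEC =====
def Spec_bresenham_los (x0 : Int) (y0 : Int) (x1 : Int) (y1 : Int) (out : List (Int × Int)) : Prop := out = bresenham_los_alt x0 y0 x1 y1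
instance (x0 : Int) (y0 : Int) (x1 : Int) (y1 : Int) (out : List (Int × Int)) : Decidable (Spec_bresenham_los x0 y0 x1 y1 out) := by unfold Spec_bresenham_los; infer_instance

-- ===== CLAIM (what is proved, stated in full; the proofs are below) =====
def Claim_equal_bresenham_los : Prop := ∀ (x0 : Int) (y0 : Int) (x1 : Int) (y1 : Int), Dom_bresenham_los x0 y0 x1 y1 → Spec_bresenham_los x0 y0 x1 y1 (bresenham_los x0 y0 x1 y1)

-- ===== LEMMAS AND PROOFS =====

-- x-major: A's first branch always fires (invariant 2*err ≥ -dy), and B's u tracks dx - 2*err.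
theorem loopA_eq_loopX (x1 y1 sx sy dx dy : Int) (_hdy : 0 ≤ dy) (hmaj : dy ≤ dx) :
    ∀ (n : Nat) (cx cy t : Int), 2 * t ≥ -dy →
      bresenhamLoopA x1 y1 sx sy dx (-dy) n cx cy t =
        bresenhamLoopX x1 y1 sx sy dx dy n cx cy (dx - 2 * t) := by
  intro n
  induction n with
  | zero => intro cx cy t _; rfl
  | succ n ih =>
    intro cx cy t hinv
    simp only [bresenhamLoopA, bresenhamLoopX]
    by_cases hstop : cx = x1 ∧ cy = y1
    · simp [hstop]
    · simp only [hstop, if_false]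
      have hfire : 2 * t ≥ -dy := hinv
      by_cases hy : 2 * t ≤ dx
      · have hu : dx - 2 * t ≥ 0 := by omega
        simp only [hfire, if_pos, hy, hu]
        have := ih (cx + sx) (cy + sy) (t + -dy + dx) (by omega)
        rw [this]; ring_nf
      · have hu : ¬ (dx - 2 * t ≥ 0) := by omega
        simp only [hfire, if_pos, hy, if_false, hu]
        have := ih (cx + sx) cy (t + -dy) (by omega)
        rw [this]; ring_nf

-- y-major: A's second branch always fires (invariant 2*err ≤ dx), and B's v tracks 2*err + dy.
theorem loopA_eq_loopY (x1 y1 sx sy dx dy : Int) (_hdx : 0 ≤ dx) (hmaj : dx < dy) :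
    ∀ (n : Nat) (cx cy t : Int), 2 * t ≤ dx →
      bresenhamLoopA x1 y1 sx sy dx (-dy) n cx cy t =
        bresenhamLoopY x1 y1 sx sy dx dy n cx cy (2 * t + dy) := by
  intro n
  induction n with
  | zero => intro cx cy t _; rfl
  | succ n ih =>
    intro cx cy t hinv
    simp only [bresenhamLoopA, bresenhamLoopY]
    by_cases hstop : cx = x1 ∧ cy = y1
    · simp [hstop]
    · simp only [hstop, if_false]
      have hfire : 2 * t ≤ dx := hinv
      by_cases hx : 2 * t ≥ -dy
      · have hv : 2 * t + dy ≥ 0 := by omega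
        simp only [hx, hfire, if_pos, hv]
        have := ih (cx + sx) (cy + sy) (t + -dy + dx) (by omega)
        rw [this]; ring_nf
      · have hv : ¬ (2 * t + dy ≥ 0) := by omega
        simp only [hx, if_false, hfire, if_pos, hv]
        have := ih cx (cy + sy) (t + dx) (by omega)
        rw [this]; ring_nf

-- ===== VERDICT (by name: the statement is the Claim_ definition above) =====
theorem bresenham_los_spec : Claim_equal_bresenham_los := by
  intro x0 y0 x1 y1 _
  unfold Spec_bresenham_los bresenham_los bresenham_los_alt
  simp only []
  set dx := |x1 - x0| with hdx
  set dy := |y1 - y0| with hdy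
  have hdx0 : 0 ≤ dx := abs_nonneg _
  have hdy0 : 0 ≤ dy := abs_nonneg _
  by_cases hmaj : dx ≥ dy
  · rw [if_pos hmaj]
    have h := loopA_eq_loopX x1 y1 (if x0 < x1 then 1 else -1) (if y0 < y1 then 1 else -1)
      dx dy hdy0 hmaj ((dx - -dy).toNat + 1) x0 y0 (dx + -dy) (by omega)
    rw [h]
    have : dx - 2 * (dx + -dy) = 2 * dy - dx := by ring
    rw [this]
    have : (dx - -dy).toNat = (dx + dy).toNat := by omega
    rw [this]
  · rw [if_neg hmaj]
    have h := loopA_eq_loopY x1 y1 (if x0 < x1 then 1 else -1) (if y0 < y1 then 1 else -1)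
      dx dy hdx0 (by omega) ((dx - -dy).toNat + 1) x0 y0 (dx + -dy) (by omega)
    rw [h]
    have : 2 * (dx + -dy) + dy = 2 * dx - dy := by ring
    rw [this]
    have : (dx - -dy).toNat = (dx + dy).toNat := by omega
    rw [this]
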